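-- pv_equiv track=rewrite | github.com/craigholland/context-atlas | scripts/check_ai_docs.py | _normalize_last_verified_block
-- ===== SOURCE A (Python) =====
-- LAST_VERIFIED_HEADING = "## Last Verified (CI)"
--
-- SECTION_HEADING_PREFIX = "## "
--
-- def _normalize_last_verified_block(text: str) -> str:
--     """
--     Normalize away the Last Verified section so we can detect metadata-only edits.
--
--     This is the key difference between:
--     - "the owner file was reviewed and meaningfully changed"
--     - "the owner file was touched only because CI rewrote the verification stamp"
--     """
--     lines = text.splitlines()
--     normalized: list[str] = []
--     in_last_verified = False
--
--     for line in lines: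
--         if line == LAST_VERIFIED_HEADING:
--             normalized.append(line)
--             normalized.append("<normalized-last-verified>")
--             in_last_verified = True
--             continue
--
--         if in_last_verified and line.startswith(SECTION_HEADING_PREFIX):
--             in_last_verified = False
--
--         if not in_last_verified:
--             normalized.append(line)
--
--     normalized_text = "\n".join(normalized).strip()
--     return normalized_text + "\n"
-- ===== SOURCE B (Python) =====
-- LAST_VERIFIED_HEADING = "## Last Verified (CI)"
--
-- SECTION_HEADING_PREFIX = "## "
--
--
-- def _normalize_last_verified_block(text: str) -> str:
--     # Split the document into sections (preamble + one section per "## " heading),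
--     # replace the body of every Last Verified section by the placeholder, concatenate.
--     lines = text.splitlines()
--     sections = []
--     cur = []
--     for line in lines:
--         if line.startswith(SECTION_HEADING_PREFIX):
--             sections.append(cur)
--             cur = [line]
--         else:
--             cur.append(line)
--     sections.append(cur)
--
--     out_lines = []
--     for sec in sections:
--         if sec and sec[0] == LAST_VERIFIED_HEADING:
--             out_lines += [sec[0], "<normalized-last-verified>"]
--         else:
--             out_lines += sec
--     return "\n".join(out_lines).strip() + "\n"
-- ===== Notes on version B (the rewrite author's own statement) =====
-- stated objective: alternative
-- what changed: Replaces the per-line boolean state machine by a two-stage split/map/concat: the text is first cut into a list of sections at every section-heading line, then each Last Verified section is mapped to heading+placeholder and the sections are concatenated.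
import Mathlib
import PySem

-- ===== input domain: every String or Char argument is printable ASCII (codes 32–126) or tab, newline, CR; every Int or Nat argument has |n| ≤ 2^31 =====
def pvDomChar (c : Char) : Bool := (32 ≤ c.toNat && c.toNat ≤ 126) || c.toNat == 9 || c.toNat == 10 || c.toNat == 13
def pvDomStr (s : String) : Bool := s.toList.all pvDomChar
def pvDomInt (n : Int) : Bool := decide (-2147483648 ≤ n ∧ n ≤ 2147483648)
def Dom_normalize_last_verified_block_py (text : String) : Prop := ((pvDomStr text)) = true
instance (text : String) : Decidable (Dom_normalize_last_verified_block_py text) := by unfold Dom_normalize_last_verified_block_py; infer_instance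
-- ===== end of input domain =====

-- B replaces A's per-line boolean state machine by a staged split/map/concat over a
-- list of sections cut at each section-heading line; objective: alternative structure, same cost.

-- ===== PORT A =====
-- one iteration of A's for-loop, on the state (normalized, in_last_verified)
def pvStepA (st : List String × Bool) (line : String) : List String × Bool :=
  if line = "## Last Verified (CI)" then
    (st.1 ++ [line] ++ ["<normalized-last-verified>"], true)
  else
    let in_last_verified :=
      if st.2 && PySem.Str.startswith line "## " then false else st.2
    if !in_last_verified then (st.1 ++ [line], in_last_verified)
    else (st.1, in_last_verified)

def normalize_last_verified_block_py (text : String) : String :=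
  PySem.Str.strip (PySem.Str.join "\n"
    (((PySem.Str.splitlines text).foldl pvStepA ([], false)).1)) ++ "\n"

-- ===== PORT B =====
-- first loop of Source B: build the section list, state (sections, cur)
def pvStepSec (st : List (List String) × List String) (line : String) :
    List (List String) × List String :=
  if PySem.Str.startswith line "## " then (st.1 ++ [st.2], [line])
  else (st.1, st.2 ++ [line])

-- second loop of Source B: one section's contribution to out_lines
def pvMapSec : List String → List String
  | [] => []
  | l :: rest =>
    if l = "## Last Verified (CI)" then [l, "<normalized-last-verified>"] else l :: rest

def normalize_last_verified_block_py_alt (text : String) : String :=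
  let st := (PySem.Str.splitlines text).foldl pvStepSec ([], [])
  let sections := st.1 ++ [st.2]
  let out_lines := sections.foldl (fun acc sec => acc ++ pvMapSec sec) []
  PySem.Str.strip (PySem.Str.join "\n" out_lines) ++ "\n"

-- ===== PRECONDITION & SPEC =====
def Spec_normalize_last_verified_block_py (text : String) (out : String) : Prop := out = normalize_last_verified_block_py_alt text
instance (text : String) (out : String) : Decidable (Spec_normalize_last_verified_block_py text out) := by unfold Spec_normalize_last_verified_block_py; infer_instance

-- ===== CLAIM (what is proved, stated in full; the proofs are below) =====
def Claim_equal_normalize_last_verified_block_py : Prop := ∀ (text : String), Dom_normalize_last_verified_block_py text → Spec_normalize_last_verified_block_py text (normalize_last_verified_block_py text)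

-- ===== LEMMAS AND PROOFS =====

-- recursive characterisation of A's fold (flag carried explicitly)
def pvFA : Bool → List String → List String
  | _, [] => []
  | flag, l :: rest =>
    if l = "## Last Verified (CI)" then
      l :: "<normalized-last-verified>" :: pvFA true rest
    else if flag && PySem.Str.startswith l "## " then
      l :: pvFA false rest
    else if flag then
      pvFA true rest
    else
      l :: pvFA false rest

lemma pvStepA_heading (acc : List String) (flag : Bool) {l : String}
    (hl : l = "## Last Verified (CI)") :
    pvStepA (acc, flag) l = (acc ++ [l] ++ ["<normalized-last-verified>"], true) := by
  simp [pvStepA, hl]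

lemma pvStepA_false (acc : List String) {l : String}
    (hl : l ≠ "## Last Verified (CI)") :
    pvStepA (acc, false) l = (acc ++ [l], false) := by
  simp [pvStepA, hl]

lemma pvStepA_true_heading_pref (acc : List String) {l : String}
    (hl : l ≠ "## Last Verified (CI)") (hs : PySem.Chars.startswith l.toList ['#', '#', ' '] = true) :
    pvStepA (acc, true) l = (acc ++ [l], false) := by
  simp [pvStepA, hl, hs]

lemma pvStepA_true_skip (acc : List String) {l : String}
    (hl : l ≠ "## Last Verified (CI)") (hs : ¬ PySem.Chars.startswith l.toList ['#', '#', ' '] = true) :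
    pvStepA (acc, true) l = (acc, true) := by
  simp [pvStepA, hl, hs]

lemma pvFold_eq (lines : List String) : ∀ (acc : List String) (flag : Bool),
    (lines.foldl pvStepA (acc, flag)).1 = acc ++ pvFA flag lines := by
  induction lines with
  | nil => intro acc flag; simp [pvFA]
  | cons l rest ih =>
    intro acc flag
    rw [List.foldl_cons]
    by_cases hl : l = "## Last Verified (CI)"
    · rw [pvStepA_heading acc flag hl, ih]
      simp [pvFA, hl]
    · cases flag with
      | false =>
        rw [pvStepA_false acc hl, ih]
        simp [pvFA, hl]
      | true =>
        by_cases hs : PySem.Chars.startswith l.toList ['#', '#', ' '] = true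
        · rw [pvStepA_true_heading_pref acc hl hs, ih]
          simp [pvFA, hl, hs]
        · rw [pvStepA_true_skip acc hl hs, ih]
          simp [pvFA, hl, hs]

lemma pvHeading_startswith :
    PySem.Chars.startswith "## Last Verified (CI)".toList ['#', '#', ' '] = true := by decide

-- recursive characterisation of B's first fold
def pvSectionsFrom : List String → List String → List (List String)
  | cur, [] => [cur]
  | cur, l :: rest =>
    if PySem.Str.startswith l "## " then cur :: pvSectionsFrom [l] rest
    else pvSectionsFrom (cur ++ [l]) rest

lemma pvFoldSec_eq (lines : List String) : ∀ (secs : List (List String)) (cur : List String),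
    ((lines.foldl pvStepSec (secs, cur)).1 ++ [(lines.foldl pvStepSec (secs, cur)).2])
      = secs ++ pvSectionsFrom cur lines := by
  induction lines with
  | nil => intro secs cur; simp [pvSectionsFrom]
  | cons l rest ih =>
    intro secs cur
    rw [List.foldl_cons]
    by_cases hs : PySem.Str.startswith l "## " = true
    · simp only [pvStepSec, if_pos hs, pvSectionsFrom]
      rw [ih]; simp [hs]
    · simp only [pvStepSec, if_neg hs, pvSectionsFrom]
      rw [ih]

-- the flag A carries, read off a section under construction
def pvIsLV : List String → Bool
  | [] => false
  | l :: _ => l = "## Last Verified (CI)"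

lemma pvIsLV_append (cur : List String) {l : String} (hl : l ≠ "## Last Verified (CI)") :
    pvIsLV (cur ++ [l]) = pvIsLV cur := by
  cases cur with
  | nil => simp [pvIsLV, hl]
  | cons c t => simp [pvIsLV]

lemma pvMapSec_append (cur : List String) {l : String} (hl : l ≠ "## Last Verified (CI)") :
    pvMapSec (cur ++ [l]) =
      if pvIsLV cur then pvMapSec cur else pvMapSec cur ++ [l] := by
  cases cur with
  | nil => simp [pvMapSec, pvIsLV, hl]
  | cons c t =>
    by_cases hc : c = "## Last Verified (CI)" <;>
      simp [pvMapSec, pvIsLV, hc]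

lemma pvSections_flat (lines : List String) : ∀ (cur : List String),
    (pvSectionsFrom cur lines).flatMap pvMapSec = pvMapSec cur ++ pvFA (pvIsLV cur) lines := by
  induction lines with
  | nil => intro cur; simp [pvSectionsFrom, pvFA]
  | cons l rest ih =>
    intro cur
    by_cases hs : PySem.Str.startswith l "## " = true
    · rw [pvSectionsFrom, if_pos hs]
      rw [List.flatMap_cons, ih]
      by_cases hl : l = "## Last Verified (CI)"
      · subst hl
        simp [pvMapSec, pvIsLV, pvFA]
      · have hsc : PySem.Chars.startswith l.toList ['#', '#', ' '] = true := hs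
        cases h : pvIsLV cur <;>
          simp [pvMapSec, pvIsLV, pvFA, hl, hsc]
    · have hl : l ≠ "## Last Verified (CI)" := by
        intro h; exact hs (h ▸ pvHeading_startswith)
      have hsc : ¬ PySem.Chars.startswith l.toList ['#', '#', ' '] = true := fun h => hs h
      rw [pvSectionsFrom, if_neg hs, ih, pvMapSec_append cur hl, pvIsLV_append cur hl]
      cases h : pvIsLV cur <;> simp [pvFA, hl, hsc, h]

lemma pvFoldConcat (sections : List (List String)) : ∀ (acc : List String),
    sections.foldl (fun acc sec => acc ++ pvMapSec sec) acc = acc ++ sections.flatMap pvMapSec := by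
  induction sections with
  | nil => intro acc; simp
  | cons s t ih => intro acc; rw [List.foldl_cons, ih]; simp

-- ===== VERDICT (by name: the statement is the Claim_ definition above) =====
theorem normalize_last_verified_block_py_spec : Claim_equal_normalize_last_verified_block_py := by
  intro text _
  unfold Spec_normalize_last_verified_block_py normalize_last_verified_block_py
    normalize_last_verified_block_py_alt
  rw [pvFold_eq]
  simp only []
  rw [pvFoldConcat]
  have h := pvFoldSec_eq (PySem.Str.splitlines text) [] []
  simp only [List.nil_append] at h
  rw [h, pvSections_flat]
  simp [pvMapSec, pvIsLV]
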